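-- pv_equiv track=rewrite | github.com/M-Abrisham/Na0S | src/na0s/layer1/whitespace_stego.py | _decode_binary_ws
-- ===== SOURCE A (Python) =====
-- def _decode_binary_ws(trailing_ws_list):
--     """Attempt simple space=0 / tab=1 binary decoding.
--
--     Concatenates trailing whitespace from all lines, maps space->0 and
--     tab->1, groups into 8-bit bytes, and decodes as ASCII.
--
--     Parameters
--     ----------
--     trailing_ws_list : list[str]
--         List of trailing whitespace strings (one per line).
--
--     Returns
--     -------
--     str
--         Decoded ASCII string (may be empty).
--     """
--     bits = []
--     for ws in trailing_ws_list:
--         for ch in ws: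
--             if ch == " ":
--                 bits.append(0)
--             elif ch == "\t":
--                 bits.append(1)
--
--     if len(bits) < 8:
--         return ""
--
--     decoded_bytes = []
--     for i in range(0, len(bits) - 7, 8):
--         byte_val = 0
--         for bit in bits[i : i + 8]:
--             byte_val = (byte_val << 1) | bit
--         if byte_val == 0:
--             break
--         decoded_bytes.append(byte_val)
--
--     try:
--         return bytes(decoded_bytes).decode("ascii", errors="replace")
--     except Exception:
--         return ""
-- ===== SOURCE B (Python) =====
-- def _decode_binary_ws(trailing_ws_list):
--     """Single streaming pass: space/tab shift a bit into a running
--     accumulator; each completed byte is emitted immediately (stop at a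
--     zero byte); no intermediate bits list is built."""
--     decoded = bytearray()
--     acc = 0
--     n = 0
--     for ws in trailing_ws_list:
--         for ch in ws:
--             if ch == " ":
--                 acc = acc << 1
--             elif ch == "\t":
--                 acc = (acc << 1) | 1
--             else:
--                 continue
--             n += 1
--             if n == 8:
--                 if acc == 0:
--                     return decoded.decode("ascii", errors="replace")
--                 decoded.append(acc)
--                 acc = 0
--                 n = 0
--     return decoded.decode("ascii", errors="replace")
-- ===== Notes on version B (the rewrite author's own statement) =====
-- stated objective: alternative
-- what changed: B replaces A's three phases (build a bits list, then a nested indexed range/slice loop over it, then bytes()) by one streaming pass over the characters that keeps only a running accumulator and bit counter and emits each byte as soon as it completes.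
import Mathlib
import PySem

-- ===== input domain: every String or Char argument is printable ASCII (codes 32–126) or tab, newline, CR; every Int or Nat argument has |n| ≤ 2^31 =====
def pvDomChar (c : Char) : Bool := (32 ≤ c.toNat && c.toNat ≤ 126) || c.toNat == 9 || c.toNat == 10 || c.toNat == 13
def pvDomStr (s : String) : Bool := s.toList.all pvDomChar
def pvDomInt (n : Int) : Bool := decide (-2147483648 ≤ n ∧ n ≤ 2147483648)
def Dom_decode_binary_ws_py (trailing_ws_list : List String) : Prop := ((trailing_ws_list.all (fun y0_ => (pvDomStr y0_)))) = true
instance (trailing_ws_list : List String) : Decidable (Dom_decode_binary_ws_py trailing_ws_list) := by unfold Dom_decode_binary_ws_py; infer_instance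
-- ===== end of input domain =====

-- B replaces A's three phases (bits list, indexed range/slice loop, bytes()) by one
-- streaming pass with a running accumulator and bit counter (objective: alternative).

-- ===== PORT A =====
-- bytes(decoded_bytes).decode("ascii", errors="replace"): exact for byte values 0..255
-- (both programs only produce such values): bytes < 128 map to their ASCII char,
-- bytes >= 128 to U+FFFD.  Shared by both ports (it is the same library call in both).
def pvDecodeAscii (bs : List Int) : String :=
  String.ofList (bs.map (fun b => if b < 128 then Char.ofNat b.toNat else Char.ofNat 0xFFFD))

-- the bits-collection loops of A
def pvABits (trailing_ws_list : List String) : List Int :=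
  trailing_ws_list.foldl
    (fun bits ws => ws.toList.foldl
      (fun bits ch => if ch = ' ' then bits ++ [0] else if ch = '\t' then bits ++ [1] else bits)
      bits)
    []

-- byte_val = 0; for bit in chunk: byte_val = (byte_val << 1) | bit
def pvByteVal (chunk : List Int) : Int :=
  chunk.foldl (fun b bit => PySem.Int.bor (b <<< (1 : Nat)) bit) 0

-- the 'for i in range(0, len(bits)-7, 8)' loop with its break
def pvALoop (bits : List Int) : List Int → List Int
  | [] => []
  | i :: rest =>
    let b := pvByteVal (PySem.List.slice bits (some i) (some (i + 8)))
    if b = 0 then [] else b :: pvALoop bits rest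

def decode_binary_ws_py (trailing_ws_list : List String) : String :=
  let bits := pvABits trailing_ws_list
  if bits.length < 8 then ""
  else pvDecodeAscii (pvALoop bits (PySem.List.pyRange 0 ((bits.length : Int) - 7) 8))

-- ===== PORT B =====
-- state: (decoded bytes, accumulator, bit counter, early-returned flag)
abbrev pvBState : Type := List Int × Int × Nat × Bool

-- the 'n += 1; if n == 8: …' tail shared by the space and tab branches
def pvBEmit (decoded : List Int) (acc : Int) (n : Nat) : pvBState :=
  if n + 1 = 8 then
    if acc = 0 then (decoded, acc, n + 1, true)
    else (decoded ++ [acc], 0, 0, false)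
  else (decoded, acc, n + 1, false)

-- one character of B's single pass ('return' inside the loop = done flag set)
def pvBStep (st : pvBState) (ch : Char) : pvBState :=
  match st with
  | (decoded, acc, n, done) =>
    if done then (decoded, acc, n, done)
    else if ch = ' ' then pvBEmit decoded (acc <<< (1 : Nat)) n
    else if ch = '\t' then pvBEmit decoded (PySem.Int.bor (acc <<< (1 : Nat)) 1) n
    else (decoded, acc, n, done)

def decode_binary_ws_py_alt (trailing_ws_list : List String) : String :=
  pvDecodeAscii
    (trailing_ws_list.foldl (fun st ws => ws.toList.foldl pvBStep st)
      (([], 0, 0, false) : pvBState)).1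

-- ===== PRECONDITION & SPEC =====
def Spec_decode_binary_ws_py (trailing_ws_list : List String) (out : String) : Prop := out = decode_binary_ws_py_alt trailing_ws_list
instance (trailing_ws_list : List String) (out : String) : Decidable (Spec_decode_binary_ws_py trailing_ws_list out) := by unfold Spec_decode_binary_ws_py; infer_instance

-- ===== CLAIM (what is proved, stated in full; the proofs are below) =====
def Claim_equal_decode_binary_ws_py : Prop := ∀ (trailing_ws_list : List String), Dom_decode_binary_ws_py trailing_ws_list → Spec_decode_binary_ws_py trailing_ws_list (decode_binary_ws_py trailing_ws_list)

-- ===== LEMMAS AND PROOFS =====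

-- canonical form both ports are reduced to: consume the bit list 8 at a time,
-- stop at a zero byte, drop a trailing partial byte
def pvChunks (bits : List Int) : List Int :=
  if bits.length < 8 then []
  else if pvByteVal (bits.take 8) = 0 then []
  else pvByteVal (bits.take 8) :: pvChunks (bits.drop 8)
termination_by bits.length
decreasing_by simp; omega

def pvBitOf? (ch : Char) : Option Int :=
  if ch = ' ' then some 0 else if ch = '\t' then some 1 else none

-- ---- pyRange with step 8: induction forms ----
lemma pvPyRange8_nil (a b : Int) (h : b ≤ a) : PySem.List.pyRange a b 8 = [] := by
  rw [PySem.List.pyRange_of_pos a b (by norm_num)]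
  simp [show ¬(a < b) by omega]

lemma pvPyRange8_cons (a b : Int) (h : a < b) :
    PySem.List.pyRange a b 8 = a :: PySem.List.pyRange (a + 8) b 8 := by
  rw [PySem.List.pyRange_of_pos a b (by norm_num),
      PySem.List.pyRange_of_pos (a + 8) b (by norm_num)]
  by_cases h2 : a + 8 < b
  · have hc : ((b - a + 8 - 1) / 8).toNat = ((b - (a + 8) + 8 - 1) / 8).toNat + 1 := by omega
    simp only [if_pos h, if_pos h2, hc, List.range_succ_eq_map, List.map_cons, List.map_map]
    congr 1
    · push_cast; ring
    · apply List.map_congr_left; intro k _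
      simp only [Function.comp_apply]; push_cast; ring
  · have hc : ((b - a + 8 - 1) / 8).toNat = 1 := by omega
    simp [if_pos h, if_neg h2, hc, List.range_one]

-- ---- A's loop equals pvChunks ----
lemma pvALoop_eq_chunks (bits : List Int) (off : Nat) :
    pvALoop bits (PySem.List.pyRange (off : Int) ((bits.length : Int) - 7) 8)
      = pvChunks (bits.drop off) := by
  have H : ∀ m off, bits.length - off ≤ m →
      pvALoop bits (PySem.List.pyRange (off : Int) ((bits.length : Int) - 7) 8)
        = pvChunks (bits.drop off) := by
    intro m
    induction m with
    | zero =>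
      intro off h
      rw [pvPyRange8_nil _ _ (by omega), pvChunks,
        if_pos (show (bits.drop off).length < 8 by simp only [List.length_drop]; omega)]
      rfl
    | succ m ih =>
      intro off h
      by_cases h8 : off + 8 ≤ bits.length
      · have hlen : ¬((bits.drop off).length < 8) := by
          simp only [List.length_drop]; omega
        rw [pvPyRange8_cons _ _ (by omega)]
        have hsl : PySem.List.slice bits (some (off : Int)) (some ((off : Int) + 8))
            = (bits.drop off).take 8 := by
          simpa using PySem.List.slice_natCast_add (xs := bits) (j := off) (n := 8)
        rw [pvChunks, if_neg hlen]
        simp only [pvALoop, hsl]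
        by_cases hb : pvByteVal ((bits.drop off).take 8) = 0
        · simp only [if_pos hb]
        · simp only [if_neg hb]
          rw [show ((off : Int) + 8) = ((off + 8 : Nat) : Int) by push_cast; ring,
            ih (off + 8) (by omega), List.drop_drop]
      · rw [pvPyRange8_nil _ _ (by omega), pvChunks,
          if_pos (show (bits.drop off).length < 8 by simp only [List.length_drop]; omega)]
        rfl
  exact H (bits.length - off) off le_rfl

-- ---- A's bit collection as a filterMap ----
lemma pvABits_inner (cs : List Char) (b0 : List Int) :
    cs.foldl (fun bits ch => if ch = ' ' then bits ++ [0] else if ch = '\t' then bits ++ [1] else bits) b0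
      = b0 ++ cs.filterMap pvBitOf? := by
  induction cs generalizing b0 with
  | nil => simp
  | cons c cs ih =>
    simp only [List.foldl_cons, List.filterMap_cons]
    by_cases h1 : c = ' '
    · subst h1
      rw [show pvBitOf? ' ' = some 0 from rfl]
      simp [ih]
    · by_cases h2 : c = '\t'
      · subst h2
        rw [show pvBitOf? '\t' = some 1 from rfl]
        simp [ih]
      · rw [show pvBitOf? c = none by simp [pvBitOf?, h1, h2]]
        simp [h1, h2, ih]

lemma pvABits_eq (l : List String) :
    pvABits l = (l.flatMap String.toList).filterMap pvBitOf? := by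
  unfold pvABits
  suffices h : ∀ b0, l.foldl
      (fun bits ws => ws.toList.foldl
        (fun bits ch => if ch = ' ' then bits ++ [0] else if ch = '\t' then bits ++ [1] else bits)
        bits) b0 = b0 ++ (l.flatMap String.toList).filterMap pvBitOf? by
    simpa using h []
  induction l with
  | nil => simp
  | cons s l ih =>
    intro b0
    simp only [List.foldl_cons, List.flatMap_cons]
    rw [pvABits_inner, ih, List.filterMap_append, List.append_assoc]

-- ---- B's step as a function of the extracted bit ----
def pvBBit (st : pvBState) (bit : Int) : pvBState :=
  match st with
  | (decoded, acc, n, done) =>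
    if done then (decoded, acc, n, done)
    else pvBEmit decoded (PySem.Int.bor (acc <<< (1 : Nat)) bit) n

lemma pvBStep_eq_bit (st : pvBState) (ch : Char) :
    pvBStep st ch = match pvBitOf? ch with
                    | some b => pvBBit st b
                    | none => st := by
  obtain ⟨decoded, acc, n, done⟩ := st
  by_cases h1 : ch = ' '
  · rw [show pvBitOf? ch = some 0 by simp [pvBitOf?, h1]]
    cases done <;> simp [pvBStep, pvBBit, h1]
  · by_cases h2 : ch = '\t'
    · rw [show pvBitOf? ch = some 1 by simp [pvBitOf?, h2]]
      cases done <;> simp [pvBStep, pvBBit, h2]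
    · rw [show pvBitOf? ch = none by simp [pvBitOf?, h1, h2]]
      cases done <;> simp [pvBStep, h1, h2]

lemma pvFoldl_chars_eq_bits (cs : List Char) (st : pvBState) :
    cs.foldl pvBStep st = (cs.filterMap pvBitOf?).foldl pvBBit st := by
  induction cs generalizing st with
  | nil => rfl
  | cons c cs ih =>
    simp only [List.foldl_cons, List.filterMap_cons, pvBStep_eq_bit]
    cases pvBitOf? c <;> simp [ih]

lemma pvBBit_done (stream : List Int) (decoded : List Int) (acc : Int) (n : Nat) :
    stream.foldl pvBBit (decoded, acc, n, true) = (decoded, acc, n, true) := by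
  induction stream with
  | nil => rfl
  | cons b s ih => simpa [pvBBit] using ih

-- ---- B's streaming fold equals pvChunks ----
lemma pvBBit_fold (stream : List Int) :
    ∀ (decoded pending : List Int), pending.length < 8 →
    (stream.foldl pvBBit (decoded, pvByteVal pending, pending.length, false)).1
      = decoded ++ pvChunks (pending ++ stream) := by
  induction stream with
  | nil =>
    intro decoded pending h
    rw [pvChunks]
    simp [h]
  | cons b rest ih =>
    intro decoded pending h
    have hacc : PySem.Int.bor (pvByteVal pending <<< (1 : Nat)) b = pvByteVal (pending ++ [b]) := by
      simp [pvByteVal, List.foldl_append]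
    have hstep : pvBBit (decoded, pvByteVal pending, pending.length, false) b
        = pvBEmit decoded (pvByteVal (pending ++ [b])) pending.length := by
      rw [pvBBit, if_neg Bool.false_ne_true, hacc]
    rw [List.foldl_cons, hstep]
    by_cases h7 : pending.length + 1 = 8
    · have hlen : (pending ++ [b]).length = 8 := by simp [h7]
      have htake : (pending ++ b :: rest).take 8 = pending ++ [b] := by
        rw [show pending ++ b :: rest = (pending ++ [b]) ++ rest by simp]
        exact List.take_left' hlen
      have hdrop : (pending ++ b :: rest).drop 8 = rest := by
        rw [show pending ++ b :: rest = (pending ++ [b]) ++ rest by simp]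
        exact List.drop_left' hlen
      have hlen8 : ¬((pending ++ b :: rest).length < 8) := by simp; omega
      rw [pvBEmit, if_pos h7, pvChunks, if_neg hlen8, htake, hdrop]
      by_cases hz : pvByteVal (pending ++ [b]) = 0
      · rw [if_pos hz, if_pos hz, pvBBit_done]
        simp
      · rw [if_neg hz, if_neg hz]
        have h0 := ih (decoded ++ [pvByteVal (pending ++ [b])]) [] (by norm_num)
        rw [show (pvByteVal [] : Int) = 0 from rfl, List.length_nil, List.nil_append] at h0
        rw [h0, List.append_assoc, List.singleton_append]
    · rw [pvBEmit, if_neg h7]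
      have h0 := ih decoded (pending ++ [b]) (by simp; omega)
      rw [show (pending ++ [b]).length = pending.length + 1 by simp,
        List.append_assoc, List.singleton_append] at h0
      exact h0

-- ---- put the two sides together ----
lemma pvA_canonical (l : List String) :
    decode_binary_ws_py l = pvDecodeAscii (pvChunks (pvABits l)) := by
  unfold decode_binary_ws_py
  by_cases h : (pvABits l).length < 8
  · rw [if_pos h, pvChunks, if_pos h]; rfl
  · rw [if_neg h]
    have h0 := pvALoop_eq_chunks (pvABits l) 0
    simp only [Nat.cast_zero, List.drop_zero] at h0
    rw [h0]

lemma pvB_canonical (l : List String) :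
    decode_binary_ws_py_alt l = pvDecodeAscii (pvChunks (pvABits l)) := by
  have h1 : ∀ (st : pvBState), l.foldl (fun st ws => ws.toList.foldl pvBStep st) st
      = (l.flatMap String.toList).foldl pvBStep st := by
    induction l with
    | nil => intro st; rfl
    | cons s l ih => intro st; simp [List.foldl_append, ih]
  unfold decode_binary_ws_py_alt
  rw [(h1 _).trans (pvFoldl_chars_eq_bits _ _)]
  have h0 := pvBBit_fold ((l.flatMap String.toList).filterMap pvBitOf?) [] [] (by norm_num)
  rw [show (pvByteVal [] : Int) = 0 from rfl, List.length_nil, List.nil_append,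
    List.nil_append] at h0
  rw [h0, pvABits_eq]

-- ===== VERDICT (by name: the statement is the Claim_ definition above) =====
theorem decode_binary_ws_py_spec : Claim_equal_decode_binary_ws_py := by
  intro l _
  unfold Spec_decode_binary_ws_py
  rw [pvA_canonical, pvB_canonical]
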